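-- pv_equiv track=rewrite | github.com/QuacQuac04/ACO | test_nckh_aco.py | create_simple_routes
-- ===== SOURCE A (Python) =====
-- def create_simple_routes(n_customers, n_vehicles):
--     # Chia khách hàng đều cho các xe (đơn giản hóa)
--     routes = []
--     customers_per_vehicle = n_customers // n_vehicles
--
--     for i in range(n_vehicles):
--         start = i * customers_per_vehicle + 1
--         end = start + customers_per_vehicle
--         if i == n_vehicles - 1:
--             end = n_customers + 1
--         route = [0] + list(range(start, end)) + [0]
--         routes.append(route)
--
--     return routes
-- ===== SOURCE B (Python) =====
-- def create_simple_routes(n_customers, n_vehicles):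
--     # Different algorithm: one pass over the CUSTOMERS, distributing each
--     # customer into its vehicle's bucket, then wrap each bucket in depot zeros.
--     cpv = n_customers // n_vehicles
--     buckets = [[] for _ in range(n_vehicles)]
--     if buckets:
--         last = n_vehicles - 1
--         for c in range(1, n_customers + 1):
--             i = (c - 1) // cpv if cpv > 0 else last
--             buckets[min(i, last)].append(c)
--     return [[0] + b + [0] for b in buckets]
-- ===== Notes on version B (the rewrite author's own statement) =====
-- stated objective: alternative
-- what changed: B loops over the customers, dropping each customer into its vehicle's bucket via a floor-division bucket index, then wraps each bucket in depot zeros, instead of A's loop over vehicles emitting contiguous index ranges with a last-vehicle branch.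
-- intended difference: When n_customers < 0 (with n_vehicles > 0 and the floored division making A's last span nonempty), A returns a last route containing phantom negative customer indices such as [0, -1, 0], while B returns empty routes [0, 0] for every vehicle, the intended value since there are no customers to serve. — e.g. on create_simple_routes(-1, 3): A returns [[0, 0], [0, 0], [0, -1, 0]], B returns [[0, 0], [0, 0], [0, 0]]
import Mathlib
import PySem

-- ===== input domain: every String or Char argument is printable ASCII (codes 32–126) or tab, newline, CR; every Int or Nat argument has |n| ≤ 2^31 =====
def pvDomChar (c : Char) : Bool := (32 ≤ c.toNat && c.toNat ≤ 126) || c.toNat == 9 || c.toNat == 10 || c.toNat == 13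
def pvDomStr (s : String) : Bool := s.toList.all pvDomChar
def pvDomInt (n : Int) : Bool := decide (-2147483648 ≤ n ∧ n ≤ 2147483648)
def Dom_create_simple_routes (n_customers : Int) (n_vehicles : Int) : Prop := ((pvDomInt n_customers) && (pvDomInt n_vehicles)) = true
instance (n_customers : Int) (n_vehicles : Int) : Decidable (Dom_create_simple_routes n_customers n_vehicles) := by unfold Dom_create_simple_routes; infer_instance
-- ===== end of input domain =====

-- B distributes each customer into its vehicle's bucket in one pass over the customers
-- (instead of A's loop over vehicles emitting index ranges); objective: alternative.

-- ===== PORT A =====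
def create_simple_routes (n_customers : Int) (n_vehicles : Int) : List (List Int) :=
  let customers_per_vehicle := PySem.Int.floordiv n_customers n_vehicles
  (PySem.List.pyRange 0 n_vehicles 1).foldl
    (fun routes i =>
      let start := i * customers_per_vehicle + 1
      let end0 := start + customers_per_vehicle
      let end_ := if i = n_vehicles - 1 then n_customers + 1 else end0
      routes ++ [[0] ++ PySem.List.pyRange start end_ 1 ++ [0]])
    []

-- ===== PORT B =====
-- 'buckets[min(i, last)].append(c)' is List.modify at that index; the index is
-- always in range when the loop body runs (buckets nonempty is guarded), so this is exact.
def create_simple_routes_alt (n_customers : Int) (n_vehicles : Int) : List (List Int) :=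
  let cpv := PySem.Int.floordiv n_customers n_vehicles
  let buckets : List (List Int) := (PySem.List.pyRange 0 n_vehicles 1).map (fun _ => [])
  let buckets :=
    if buckets.isEmpty then buckets
    else
      (PySem.List.pyRange 1 (n_customers + 1) 1).foldl
        (fun bs c =>
          bs.modify
            (min (if 0 < cpv then PySem.Int.floordiv (c - 1) cpv else n_vehicles - 1)
                 (n_vehicles - 1)).toNat
            (fun b => b ++ [c]))
        buckets
  buckets.map (fun b => [0] ++ b ++ [0])

-- ===== PRECONDITION & SPEC =====
-- Pre_: Python's '//' raises ZeroDivisionError when n_vehicles == 0 (both A and B raise there).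
def Pre_create_simple_routes (n_customers : Int) (n_vehicles : Int) : Prop := n_vehicles ≠ 0
instance (n_customers : Int) (n_vehicles : Int) : Decidable (Pre_create_simple_routes n_customers n_vehicles) := by unfold Pre_create_simple_routes; infer_instance
def pvWitness_create_simple_routes : Int × Int := (7, 3)

-- When n_customers < 0 (and the floor-division remainder makes A's last span nonempty),
-- A returns a last route containing phantom negative "customer" indices such as [0, -1, 0],
-- while B returns empty routes [0, 0] for every vehicle — the intended value, since there
-- are no customers to serve.
def D_create_simple_routes (n_customers : Int) (n_vehicles : Int) : Prop :=
  n_customers < 0 ∧ 0 < n_vehicles ∧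
    (n_vehicles - 1) * PySem.Int.floordiv n_customers n_vehicles + 1 ≤ n_customers
instance (n_customers : Int) (n_vehicles : Int) : Decidable (D_create_simple_routes n_customers n_vehicles) := by unfold D_create_simple_routes; infer_instance

def Spec_create_simple_routes (n_customers : Int) (n_vehicles : Int) (out : List (List Int)) : Prop := ¬ D_create_simple_routes n_customers n_vehicles → out = create_simple_routes_alt n_customers n_vehicles
instance (n_customers : Int) (n_vehicles : Int) (out : List (List Int)) : Decidable (Spec_create_simple_routes n_customers n_vehicles out) := by unfold Spec_create_simple_routes; infer_instance

def pvDiffWitness_create_simple_routes : Int × Int := (-1, 3)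
def pvDiffWitnessOut_create_simple_routes : (List (List Int)) × (List (List Int)) :=
  ([[0, 0], [0, 0], [0, -1, 0]], [[0, 0], [0, 0], [0, 0]])

-- ===== CLAIM (what is proved, stated in full; the proofs are below) =====
def Claim_unchanged_create_simple_routes : Prop := ∀ (n_customers : Int) (n_vehicles : Int), Dom_create_simple_routes n_customers n_vehicles → Pre_create_simple_routes n_customers n_vehicles → Spec_create_simple_routes n_customers n_vehicles (create_simple_routes n_customers n_vehicles)
def Claim_changed_create_simple_routes : Prop := Dom_create_simple_routes (pvDiffWitness_create_simple_routes.1) (pvDiffWitness_create_simple_routes.2) ∧ Pre_create_simple_routes (pvDiffWitness_create_simple_routes.1) (pvDiffWitness_create_simple_routes.2) ∧ D_create_simple_routes (pvDiffWitness_create_simple_routes.1) (pvDiffWitness_create_simple_routes.2) ∧ create_simple_routes (pvDiffWitness_create_simple_routes.1) (pvDiffWitness_create_simple_routes.2) = pvDiffWitnessOut_create_simple_routes.1 ∧ create_simple_routes_alt (pvDiffWitness_create_simple_routes.1) (pvDiffWitness_create_simple_routes.2) = pvDiffWitnessOut_create_simple_routes.2 ∧ pvDiffWitnessOut_create_simple_routes.1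 ≠ pvDiffWitnessOut_create_simple_routes.2

-- ===== LEMMAS AND PROOFS =====

-- A's route-end expression for vehicle i.
def pvEnd (nc nv cpv i : Int) : Int := if i = nv - 1 then nc + 1 else i * cpv + 1 + cpv

-- A as a map over the vehicle indices.
theorem portA_eq_map (nc nv : Int) :
    create_simple_routes nc nv
      = (PySem.List.pyRange 0 nv 1).map
          (fun i => [0] ++ PySem.List.pyRange (i * PySem.Int.floordiv nc nv + 1)
                      (pvEnd nc nv (PySem.Int.floordiv nc nv) i) 1 ++ [0]) := by
  unfold create_simple_routes
  rw [PySem.List.foldl_append_singleton_eq_map]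
  simp [pvEnd]

-- List.modify of a mapped range, as a pointwise map.
theorem modify_map_pyRange (nv j : Int) (g : Int → List Int) (h : List Int → List Int)
    (h0 : 0 ≤ j) (h1 : j < nv) :
    ((PySem.List.pyRange 0 nv 1).map g).modify j.toNat h
      = (PySem.List.pyRange 0 nv 1).map (fun i => if i = j then h (g i) else g i) := by
  apply List.ext_getElem
  · simp
  · intro k hk hk'
    simp only [List.getElem_modify, List.getElem_map, PySem.List.getElem_pyRange_one]
    have hk2 : (k : Int) < nv := by
      have := hk'; simp [PySem.List.length_pyRange_one] at this; omega
    by_cases hkj : j.toNat = k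
    · have : (0 : Int) + k = j := by omega
      simp [hkj, this]
    · simp [hkj]
      intro h'
      exact absurd h' (by omega)

-- Where customer c lands: the bucket index is in range, c lies in its route span,
-- and c lies in no other vehicle's span.
theorem assign_facts (nc nv c : Int) (hnv : 0 < nv) (hc1 : 1 ≤ c) (hcn : c ≤ nc) :
    0 ≤ min (if 0 < PySem.Int.floordiv nc nv then PySem.Int.floordiv (c - 1) (PySem.Int.floordiv nc nv) else nv - 1) (nv - 1) ∧
    min (if 0 < PySem.Int.floordiv nc nv then PySem.Int.floordiv (c - 1) (PySem.Int.floordiv nc nv) else nv - 1) (nv - 1) < nv ∧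
    (min (if 0 < PySem.Int.floordiv nc nv then PySem.Int.floordiv (c - 1) (PySem.Int.floordiv nc nv) else nv - 1) (nv - 1)) * PySem.Int.floordiv nc nv + 1 ≤ c ∧
    c < pvEnd nc nv (PySem.Int.floordiv nc nv) (min (if 0 < PySem.Int.floordiv nc nv then PySem.Int.floordiv (c - 1) (PySem.Int.floordiv nc nv) else nv - 1) (nv - 1)) ∧
    (∀ i : Int, 0 ≤ i → i < nv →
      i ≠ min (if 0 < PySem.Int.floordiv nc nv then PySem.Int.floordiv (c - 1) (PySem.Int.floordiv nc nv) else nv - 1) (nv - 1) →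
      pvEnd nc nv (PySem.Int.floordiv nc nv) i ≤ c ∨ c ≤ i * PySem.Int.floordiv nc nv) := by
  set cpv := PySem.Int.floordiv nc nv with hcpvdef
  by_cases hp : 0 < cpv
  · set q := PySem.Int.floordiv (c - 1) cpv with hqdef
    have hql : q * cpv ≤ c - 1 := (PySem.Int.le_floordiv_iff_mul_le hp).mp le_rfl
    have hqu : c - 1 < (q + 1) * cpv := (PySem.Int.floordiv_lt_iff_lt_mul hp).mp (lt_add_one q)
    have hq0 : 0 ≤ q := (PySem.Int.le_floordiv_iff_mul_le hp).mpr (by omega)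
    simp only [if_pos hp]
    by_cases hq : q ≤ nv - 1
    · rw [min_eq_left hq]
      refine ⟨hq0, by omega, by nlinarith, ?_, ?_⟩
      · unfold pvEnd
        by_cases hql2 : q = nv - 1
        · rw [if_pos hql2]; omega
        · rw [if_neg hql2]; nlinarith
      · intro i hi0 hi1 hij
        by_cases hlt : i < q
        · left
          unfold pvEnd
          rw [if_neg (by omega)]
          have : (i + 1) * cpv ≤ q * cpv := by nlinarith
          nlinarith
        · right
          have hqi : q + 1 ≤ i := by omega
          have : (q + 1) * cpv ≤ i * cpv := by nlinarith
          omega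
    · rw [min_eq_right (by omega)]
      have h1 : (nv - 1) * cpv ≤ q * cpv := by nlinarith
      refine ⟨by omega, by omega, by omega, ?_, ?_⟩
      · unfold pvEnd; rw [if_pos rfl]; omega
      · intro i hi0 hi1 hij
        left
        unfold pvEnd
        rw [if_neg (by omega)]
        have hile : i + 1 ≤ nv - 1 := by omega
        have h2 : (i + 1) * cpv ≤ (nv - 1) * cpv :=
          mul_le_mul_of_nonneg_right hile (le_of_lt hp)
        have h3 : (i + 1) * cpv = i * cpv + cpv := by ring
        linarith
  · have hc0 : 0 ≤ cpv := (PySem.Int.le_floordiv_iff_mul_le hnv).mpr (by omega)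
    have hz : cpv = 0 := by omega
    simp only [if_neg hp, min_self]
    refine ⟨by omega, by omega, by rw [hz]; omega, ?_, ?_⟩
    · unfold pvEnd; rw [if_pos rfl]; omega
    · intro i hi0 hi1 hij
      left
      unfold pvEnd
      rw [if_neg hij, hz]
      omega

-- Loop invariant for B's customer-distribution pass (n_customers > 0 case).
theorem bucket_inv (nc nv : Int) (hnv : 0 < nv) (hnc : 0 < nc) (m : Nat) (hm : (m : Int) ≤ nc) :
    (PySem.List.pyRange 1 ((m : Int) + 1) 1).foldl
        (fun bs c =>
          bs.modify
            (min (if 0 < PySem.Int.floordiv nc nv then PySem.Int.floordiv (c - 1) (PySem.Int.floordiv nc nv) else nv - 1)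
                 (nv - 1)).toNat
            (fun b => b ++ [c]))
        ((PySem.List.pyRange 0 nv 1).map (fun _ => []))
      = (PySem.List.pyRange 0 nv 1).map
          (fun i => PySem.List.pyRange (i * PySem.Int.floordiv nc nv + 1)
                      (min (pvEnd nc nv (PySem.Int.floordiv nc nv) i) ((m : Int) + 1)) 1) := by
  have hcpv0 : 0 ≤ PySem.Int.floordiv nc nv := (PySem.Int.le_floordiv_iff_mul_le hnv).mpr (by omega)
  induction m with
  | zero =>
    rw [show ((0 : Nat) : Int) + 1 = 1 by norm_num, PySem.List.pyRange_one_eq_nil le_rfl]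
    simp only [List.foldl_nil]
    apply List.map_congr_left
    intro i hi
    rw [PySem.List.mem_pyRange_one] at hi
    have : 0 ≤ i * PySem.Int.floordiv nc nv := mul_nonneg hi.1 hcpv0
    rw [eq_comm]
    apply PySem.List.pyRange_one_eq_nil
    omega
  | succ m ih =>
    have hm' : (m : Int) ≤ nc := by push_cast at hm ⊢; omega
    have hcast : ((m + 1 : Nat) : Int) + 1 = ((m : Int) + 1) + 1 := by push_cast; ring
    rw [hcast, PySem.List.pyRange_one_succ_right (by omega), List.foldl_append, ih hm']
    simp only [List.foldl_cons, List.foldl_nil]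
    obtain ⟨hj0, hjnv, hsj, hEj, hkey⟩ :=
      assign_facts nc nv ((m : Int) + 1) hnv (by omega) (by push_cast at hm; omega)
    set j : Int := min (if 0 < PySem.Int.floordiv nc nv then PySem.Int.floordiv ((m : Int) + 1 - 1) (PySem.Int.floordiv nc nv) else nv - 1) (nv - 1) with hjdef
    rw [modify_map_pyRange nv j _ _ hj0 hjnv]
    apply List.map_congr_left
    intro i hi
    rw [PySem.List.mem_pyRange_one] at hi
    by_cases hij : i = j
    · rw [if_pos hij]
      rw [hij]
      have h1 : min (pvEnd nc nv (PySem.Int.floordiv nc nv) j) ((m : Int) + 1) = (m : Int) + 1 := by omega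
      have h2 : min (pvEnd nc nv (PySem.Int.floordiv nc nv) j) ((m : Int) + 1 + 1) = (m : Int) + 1 + 1 := by omega
      rw [h1, h2]
      rw [eq_comm]
      exact PySem.List.pyRange_one_succ_right (by omega)
    · rw [if_neg hij]
      rcases hkey i hi.1 hi.2 hij with hE | hs
      · rw [min_eq_left (by omega), min_eq_left (by omega)]
      · rw [PySem.List.pyRange_one_eq_nil (by omega), PySem.List.pyRange_one_eq_nil (by omega)]

-- B when there is at least one vehicle but no customer to distribute.
theorem altB_of_nonpos (nc nv : Int) (hnv : 0 < nv) (hnc : nc ≤ 0) :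
    create_simple_routes_alt nc nv = (PySem.List.pyRange 0 nv 1).map (fun _ => [0, 0]) := by
  unfold create_simple_routes_alt
  have hemp : ((PySem.List.pyRange 0 nv 1).map (fun _ => ([] : List Int))).isEmpty = false := by
    simp
    omega
  rw [PySem.List.pyRange_one_eq_nil (show nc + 1 ≤ 1 by omega)]
  simp only [hemp, Bool.false_eq_true, if_false, List.foldl_nil, List.map_map]
  rfl

theorem altB_of_pos (nc nv : Int) (hnv : 0 < nv) :
    create_simple_routes_alt nc nv
      = ((PySem.List.pyRange 1 (nc + 1) 1).foldl
          (fun bs c =>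
            bs.modify
              (min (if 0 < PySem.Int.floordiv nc nv then PySem.Int.floordiv (c - 1) (PySem.Int.floordiv nc nv) else nv - 1)
                   (nv - 1)).toNat
              (fun b => b ++ [c]))
          ((PySem.List.pyRange 0 nv 1).map (fun _ => []))).map (fun b => [0] ++ b ++ [0]) := by
  unfold create_simple_routes_alt
  have hemp : ((PySem.List.pyRange 0 nv 1).map (fun _ => ([] : List Int))).isEmpty = false := by
    simp
    omega
  simp only [hemp, Bool.false_eq_true, if_false]

theorem AB_eq (nc nv : Int) (hnv : nv ≠ 0) (hD : ¬ D_create_simple_routes nc nv) :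
    create_simple_routes nc nv = create_simple_routes_alt nc nv := by
  rcases lt_trichotomy nv 0 with hneg | hz | hpos
  · -- no vehicles at all: both are []
    rw [portA_eq_map]
    unfold create_simple_routes_alt
    rw [PySem.List.pyRange_one_eq_nil (le_of_lt hneg)]
    simp
  · exact absurd hz hnv
  · rcases le_or_gt nc 0 with hle | hgt
    · -- no customers to place: every route is [0, 0] on both sides
      rw [portA_eq_map, altB_of_nonpos nc nv hpos hle]
      have hcpvle : PySem.Int.floordiv nc nv ≤ 0 := by
        have h1 : nc < 1 * nv := by omega
        have := (PySem.Int.floordiv_lt_iff_lt_mul (q := 1) hpos).mpr h1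
        omega
      have hlast : nc ≤ (nv - 1) * PySem.Int.floordiv nc nv := by
        rcases lt_or_eq_of_le hle with hlt | heq0
        · have h3 : ¬ ((nv - 1) * PySem.Int.floordiv nc nv + 1 ≤ nc) := fun h3 => hD ⟨hlt, hpos, h3⟩
          omega
        · have hge : 0 ≤ PySem.Int.floordiv nc nv :=
            (PySem.Int.le_floordiv_iff_mul_le hpos).mpr (by omega)
          have hz2 : PySem.Int.floordiv nc nv = 0 := by omega
          rw [hz2, mul_zero]
          omega
      apply List.map_congr_left
      intro i hi
      rw [PySem.List.mem_pyRange_one] at hi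
      unfold pvEnd
      by_cases hi2 : i = nv - 1
      · rw [if_pos hi2, hi2, PySem.List.pyRange_one_eq_nil (by omega)]
        rfl
      · rw [if_neg hi2, PySem.List.pyRange_one_eq_nil (by omega)]
        rfl
    · -- at least one customer: use the distribution invariant at m = nc
      have hcpv0 : 0 ≤ PySem.Int.floordiv nc nv :=
        (PySem.Int.le_floordiv_iff_mul_le hpos).mpr (by omega)
      have hnvcpv : PySem.Int.floordiv nc nv * nv ≤ nc :=
        (PySem.Int.le_floordiv_iff_mul_le hpos).mp le_rfl
      have hcast : ((nc.toNat : Nat) : Int) = nc := Int.toNat_of_nonneg (le_of_lt hgt)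
      rw [portA_eq_map, altB_of_pos nc nv hpos,
          show nc + 1 = ((nc.toNat : Nat) : Int) + 1 by rw [hcast],
          bucket_inv nc nv hpos hgt nc.toNat (by omega), List.map_map]
      apply List.map_congr_left
      intro i hi
      rw [PySem.List.mem_pyRange_one] at hi
      simp only [Function.comp]
      have hmin : min (pvEnd nc nv (PySem.Int.floordiv nc nv) i) (((nc.toNat : Nat) : Int) + 1)
          = pvEnd nc nv (PySem.Int.floordiv nc nv) i := by
        unfold pvEnd
        by_cases hi2 : i = nv - 1
        · rw [if_pos hi2]
          omega
        · rw [if_neg hi2]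
          have hile : i + 1 ≤ nv := by omega
          have h2 : (i + 1) * PySem.Int.floordiv nc nv ≤ nv * PySem.Int.floordiv nc nv :=
            mul_le_mul_of_nonneg_right hile hcpv0
          have h3 : (i + 1) * PySem.Int.floordiv nc nv = i * PySem.Int.floordiv nc nv + PySem.Int.floordiv nc nv := by ring
          have h4 : nv * PySem.Int.floordiv nc nv = PySem.Int.floordiv nc nv * nv := by ring
          omega
      rw [hmin]

-- ===== VERDICT (by name: the statement is the Claim_ definition above) =====
theorem create_simple_routes_spec : Claim_unchanged_create_simple_routes := by
  intro nc nv _ hpre hD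
  exact AB_eq nc nv hpre hD

theorem create_simple_routes_changed : Claim_changed_create_simple_routes := by
  unfold Claim_changed_create_simple_routes; decide
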